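-- pv_equiv track=rewrite | github.com/sethbang/parkingfunctions | parkingfunctions/validate.py | pigeonhole_check
-- ===== SOURCE A (Python) =====
-- def pigeonhole_check(park_func):
--
--     """Validates a Parking Function.
--
--     Validates a parking function with pigeonhole principle.
--
--     Args:
--         park_func (list): A list representing a parking function.
--
--     Returns:
--         bool: If parking function is valid.
--
--     """
--     p_n = len(park_func)
--
--     for i in range(p_n):
--
--         m = 0
--
--         for j in park_func:
--
--             if j > p_n:
--                 return False
--
--             if j >= p_n - i:
--                 m = m + 1
--
--         if m > i + 1:
--             return False
--
--     return True
-- ===== SOURCE B (Python) =====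
-- def pigeonhole_check(park_func):
--     """Validates a Parking Function (pigeonhole principle), O(n):
--     histogram of values + one suffix-sum pass over thresholds."""
--     n = len(park_func)
--     if any(v > n for v in park_func):
--         return False
--     hist = {}
--     for v in park_func:
--         if v >= 1:
--             hist[v] = hist.get(v, 0) + 1
--     s = 0
--     for k in range(n, 0, -1):
--         s += hist.get(k, 0)
--         if s > n - k + 1:
--             return False
--     return True
-- ===== Notes on version B (the rewrite author's own statement) =====
-- stated objective: faster
-- what changed: Replaced the nested loop (for each threshold, rescan the whole list to count) by a single histogram pass plus one suffix-sum sweep over the thresholds k = n..1.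
import Mathlib
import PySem

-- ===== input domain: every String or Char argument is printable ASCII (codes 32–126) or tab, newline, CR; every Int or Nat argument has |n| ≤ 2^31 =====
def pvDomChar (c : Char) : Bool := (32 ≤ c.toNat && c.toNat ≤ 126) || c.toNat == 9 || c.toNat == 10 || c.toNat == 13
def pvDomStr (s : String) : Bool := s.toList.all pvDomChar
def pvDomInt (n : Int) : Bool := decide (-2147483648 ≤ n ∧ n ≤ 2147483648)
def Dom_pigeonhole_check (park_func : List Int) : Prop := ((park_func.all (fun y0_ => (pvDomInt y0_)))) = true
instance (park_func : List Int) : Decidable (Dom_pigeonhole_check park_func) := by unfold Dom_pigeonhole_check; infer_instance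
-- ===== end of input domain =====

-- B replaces A's nested rescans by a value histogram plus one suffix-sum sweep (objective: faster).

-- ===== PORT A =====
-- inner loop 'for j in park_func'; none = A's early 'return False' on j > p_n
def pvInnerA (p_n i : Int) : List Int → Int → Option Int
  | [], m => some m
  | j :: rest, m =>
    if j > p_n then none
    else pvInnerA p_n i rest (if j ≥ p_n - i then m + 1 else m)

-- outer loop 'for i in range(p_n)'
def pvOuterA (p_n : Int) (park_func : List Int) : List Int → Bool
  | [] => true
  | i :: rest =>
    match pvInnerA p_n i park_func 0 with
    | none => false
    | some m => if m > i + 1 then false else pvOuterA p_n park_func rest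

def pigeonhole_check (park_func : List Int) : Bool :=
  pvOuterA (park_func.length : Int) park_func (PySem.List.pyRange 0 (park_func.length : Int) 1)

-- ===== PORT B =====
-- histogram loop: 'for v in park_func: if v >= 1: hist[v] = hist.get(v, 0) + 1'
def pvHistB (park_func : List Int) : PySem.Dict Int Int :=
  park_func.foldl (fun h v => if v ≥ 1 then h.insert v (h.getD v 0 + 1) else h) PySem.Dict.empty

-- suffix-sum loop: 'for k in range(n, 0, -1)'
def pvScanB (n : Int) (h : PySem.Dict Int Int) : List Int → Int → Bool
  | [], _ => true
  | k :: rest, s =>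
    let s' := s + h.getD k 0
    if s' > n - k + 1 then false else pvScanB n h rest s'

def pigeonhole_check_alt (park_func : List Int) : Bool :=
  let n : Int := (park_func.length : Int)
  if park_func.any (fun v => v > n) then false
  else pvScanB n (pvHistB park_func) (PySem.List.pyRange n 0 (-1)) 0

-- ===== PRECONDITION & SPEC =====
def Spec_pigeonhole_check (park_func : List Int) (out : Bool) : Prop := out = pigeonhole_check_alt park_func
instance (park_func : List Int) (out : Bool) : Decidable (Spec_pigeonhole_check park_func out) := by unfold Spec_pigeonhole_check; infer_instance

-- ===== CLAIM (what is proved, stated in full; the proofs are below) =====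
def Claim_equal_pigeonhole_check : Prop := ∀ (park_func : List Int), Dom_pigeonhole_check park_func → Spec_pigeonhole_check park_func (pigeonhole_check park_func)

-- ===== LEMMAS AND PROOFS =====

-- number of entries ≥ t
def pvCnt (pf : List Int) (t : Int) : Nat := pf.countP (fun j => decide (t ≤ j))

-- A's inner loop: None iff some entry exceeds p_n, else m plus the count of entries ≥ p_n - i
lemma pvInnerA_spec (n i : Int) (pf : List Int) : ∀ m : Int,
    pvInnerA n i pf m =
      if pf.any (fun j => decide (n < j)) then none
      else some (m + (pvCnt pf (n - i) : Int)) := by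
  induction pf with
  | nil => simp [pvInnerA, pvCnt]
  | cons j rest ih =>
    intro m
    by_cases hj : n < j
    · simp [pvInnerA, hj]
    · simp only [pvInnerA, if_neg (by omega : ¬ j > n), ih]
      simp only [List.any_cons, hj, decide_false, Bool.false_or]
      by_cases hany : rest.any (fun j => decide (n < j)) = true
      · simp only [hany, if_true]
      · simp only [Bool.not_eq_true] at hany
        simp only [hany, Bool.false_eq_true, if_false, Option.some.injEq]
        have hc : pvCnt (j :: rest) (n - i) = (if n - i ≤ j then 1 else 0) + pvCnt rest (n - i) := by
          simp only [pvCnt, List.countP_cons]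
          split_ifs with h <;> simp at h ⊢ <;> omega
        rw [hc]
        push_cast
        split_ifs with h1 h2 h2 <;> omega

-- A's outer loop over any list of thresholds i
lemma pvOuterA_spec (n : Int) (pf : List Int) : ∀ ks : List Int,
    pvOuterA n pf ks = true ↔
      ∀ i ∈ ks, pf.any (fun j => decide (n < j)) = false ∧
        ((pvCnt pf (n - i) : Int) ≤ i + 1) := by
  intro ks
  induction ks with
  | nil => simp [pvOuterA]
  | cons i rest ih =>
    simp only [pvOuterA, pvInnerA_spec n i pf 0]
    by_cases hany : pf.any (fun j => decide (n < j)) = true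
    · rw [if_pos hany]
      constructor
      · intro h; exact absurd h (by simp)
      · intro h
        have := (h i (List.mem_cons_self ..)).1
        rw [hany] at this; cases this
    · simp only [Bool.not_eq_true] at hany
      rw [if_neg (by simp [hany])]
      simp only [zero_add]
      by_cases hm : (pvCnt pf (n - i) : Int) > i + 1
      · rw [if_pos hm]
        constructor
        · intro h; exact absurd h (by simp)
        · intro h; exact absurd (h i (List.mem_cons_self ..)).2 (by omega)
      · rw [if_neg hm, ih]
        constructor
        · intro h j hj
          rcases List.mem_cons.mp hj with rfl | hj
          · exact ⟨hany, by omega⟩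
          · exact h j hj
        · intro h j hj; exact h j (List.mem_cons.mpr (Or.inr hj))

-- B's guarded histogram loop is the plain counting loop over the kept values
lemma pvHistB_guard (pf : List Int) : ∀ h : PySem.Dict Int Int,
    pf.foldl (fun h v => if v ≥ 1 then h.insert v (h.getD v 0 + 1) else h) h
      = (pf.filter (fun v => decide (1 ≤ v))).foldl (fun h v => h.insert v (h.getD v 0 + 1)) h := by
  induction pf with
  | nil => intro h; rfl
  | cons v rest ih =>
    intro h
    by_cases hv : 1 ≤ v
    · simp [List.foldl_cons, List.filter_cons, hv, ih]
    · simp [List.foldl_cons, List.filter_cons, hv, ih, (by omega : ¬ v ≥ 1)]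

lemma pvHistB_getD (pf : List Int) (k : Int) (hk : 1 ≤ k) :
    (pvHistB pf).getD k 0 = (pf.count k : Int) := by
  rw [pvHistB, pvHistB_guard, PySem.Dict.getD_foldl_insert_add_one]
  rw [PySem.Dict.getD_empty]
  rw [List.count_filter (by simpa using hk)]
  simp

lemma pvCnt_split (pf : List Int) (k : Int) :
    pvCnt pf k = pf.count k + pvCnt pf (k + 1) := by
  induction pf with
  | nil => rfl
  | cons v rest ih =>
    simp only [pvCnt, List.countP_cons, List.count_cons, beq_iff_eq, decide_eq_true_eq] at ih ⊢
    rw [ih]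
    split_ifs <;> omega

-- B's suffix-sum sweep, counting down from a with accumulator s = #{v ≥ a+1}
lemma pvScanB_spec (pf : List Int) (n : Int) : ∀ (aN : Nat) (a s : Int), a = (aN : Int) →
    s = (pvCnt pf (a + 1) : Int) →
    (pvScanB n (pvHistB pf) (PySem.List.pyRange a 0 (-1)) s = true ↔
      ∀ k : Int, 1 ≤ k → k ≤ a → (pvCnt pf k : Int) ≤ n - k + 1) := by
  intro aN
  induction aN with
  | zero =>
    intro a s ha hs
    rw [PySem.List.pyRange_neg_one_eq_nil (by omega)]
    simp only [pvScanB, true_iff]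
    intro k hk1 hk2; omega
  | succ m ih =>
    intro a s ha hs
    rw [PySem.List.pyRange_neg_one_cons (by omega)]
    simp only [pvScanB]
    have hga : (pvHistB pf).getD a 0 = (pf.count a : Int) := pvHistB_getD pf a (by omega)
    have hsum : s + (pvHistB pf).getD a 0 = (pvCnt pf a : Int) := by
      rw [hga, hs, pvCnt_split pf a]
      push_cast; ring
    rw [hsum]
    by_cases hbad : (pvCnt pf a : Int) > n - a + 1
    · rw [if_pos hbad]
      simp only [Bool.false_eq_true, false_iff]
      intro h
      exact absurd (h a (by omega) le_rfl) (by omega)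
    · rw [if_neg hbad]
      rw [ih (a - 1) _ (by omega) (by rw [(by ring : a - 1 + 1 = a)])]
      constructor
      · intro h k hk1 hk2
        rcases eq_or_lt_of_le hk2 with rfl | hlt
        · omega
        · exact h k hk1 (by omega)
      · intro h k hk1 hk2
        exact h k hk1 (by omega)

lemma pvMain (pf : List Int) :
    pvOuterA (pf.length : Int) pf (PySem.List.pyRange 0 (pf.length : Int) 1) =
      (if pf.any (fun v => v > (pf.length : Int)) then false
       else pvScanB (pf.length : Int) (pvHistB pf) (PySem.List.pyRange (pf.length : Int) 0 (-1)) 0) := by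
  set n : Int := (pf.length : Int) with hn
  by_cases hne : pf.length = 0
  · rcases List.eq_nil_of_length_eq_zero hne with rfl
    decide
  · have hn1 : 1 ≤ n := by simp [hn]; omega
    by_cases hany : pf.any (fun v => decide (n < v)) = true
    · rw [if_pos (by simpa using hany)]
      rw [← Bool.not_eq_true, pvOuterA_spec]
      intro h
      have := (h 0 (by rw [PySem.List.mem_pyRange_one]; omega)).1
      rw [hany] at this; cases this
    · simp only [Bool.not_eq_true] at hany
      have hanyB : pf.any (fun v => v > n) = false := hany
      rw [hanyB]
      simp only [Bool.false_eq_true, if_false]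
      have hzero : (0 : Int) = (pvCnt pf (n + 1) : Int) := by
        have hz : pvCnt pf (n + 1) = 0 := by
          rw [pvCnt, List.countP_eq_zero]
          intro v hv
          have hv2 := List.any_eq_false.mp hany v hv
          simp at hv2 ⊢
          omega
        rw [hz]; rfl
      apply Bool.coe_iff_coe.mp
      rw [pvScanB_spec pf n pf.length n 0 rfl hzero]
      rw [pvOuterA_spec]
      constructor
      · intro h k hk1 hk2
        have := (h (n - k) (by rw [PySem.List.mem_pyRange_one]; omega)).2
        rw [(by ring : n - (n - k) = k)] at this
        omega
      · intro h i hi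
        rw [PySem.List.mem_pyRange_one] at hi
        refine ⟨hany, ?_⟩
        have := h (n - i) (by omega) (by omega)
        omega

-- ===== VERDICT (by name: the statement is the Claim_ definition above) =====
theorem pigeonhole_check_spec : Claim_equal_pigeonhole_check := by
  intro pf _
  show pigeonhole_check pf = pigeonhole_check_alt pf
  simp only [pigeonhole_check, pigeonhole_check_alt]
  exact pvMain pf
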